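-- pv_equiv track=rewrite | github.com/woodhk/fluentpro-backend | course/langgraph_rag.py | merge_chunk_results
-- ===== SOURCE A (Python) =====
-- from typing import TypedDict, Dict, Any, List, Annotated, Literal
--
-- def merge_chunk_results(chunk_results: List[Dict[str, str]]) -> Dict[str, str]:
--     """Merge results from multiple chunks into a single structured document"""
--     merged = {
--         "introduction": "",
--         "main_content": "",
--         "conclusion": ""
--     }
--
--     # Collect all parts
--     all_intros = []
--     all_main = []
--     all_conclusions = []
--
--     for result in chunk_results:
--         if result.get("introduction") and not result["introduction"].startswith("[PARTIAL]"):
--             all_intros.append(result["introduction"])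
--         if result.get("main_content"):
--             all_main.append(result["main_content"])
--         if result.get("conclusion") and not result["conclusion"].startswith("[PARTIAL]"):
--             all_conclusions.append(result["conclusion"])
--
--     # Merge sections
--     merged["introduction"] = "\n\n".join(all_intros) if all_intros else "Document introduction not clearly identified."
--     merged["main_content"] = "\n\n".join(all_main) if all_main else "Main content processing incomplete."
--     merged["conclusion"] = "\n\n".join(all_conclusions) if all_conclusions else "Document conclusion not clearly identified."
--
--     return merged
-- ===== SOURCE B (Python) =====
-- def merge_chunk_results(chunk_results):
--     """Merge results from multiple chunks into a single structured document.
--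
--     Walks the chunks back-to-front, prepending each kept part directly onto an
--     incrementally joined string per section (None = nothing collected yet), so
--     no intermediate lists and no final join are needed.
--     """
--     def prepend(v, tail, allow_partial):
--         if not v or (not allow_partial and v.startswith("[PARTIAL]")):
--             return tail
--         return v if tail is None else v + "\n\n" + tail
--
--     intro = main = concl = None
--     for r in reversed(chunk_results):
--         intro = prepend(r.get("introduction"), intro, False)
--         main = prepend(r.get("main_content"), main, True)
--         concl = prepend(r.get("conclusion"), concl, False)
--
--     return {
--         "introduction": "Document introduction not clearly identified." if intro is None else intro,
--         "main_content": "Main content processing incomplete." if main is None else main,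
--         "conclusion": "Document conclusion not clearly identified." if concl is None else concl,
--     }
-- ===== Notes on version B (the rewrite author's own statement) =====
-- stated objective: alternative
-- what changed: Instead of collecting three lists in a forward pass and joining them at the end, B walks the chunks back-to-front and prepends each kept part directly onto an incrementally joined per-section string (None = empty), eliminating the intermediate lists and the final join step.
import Mathlib
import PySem

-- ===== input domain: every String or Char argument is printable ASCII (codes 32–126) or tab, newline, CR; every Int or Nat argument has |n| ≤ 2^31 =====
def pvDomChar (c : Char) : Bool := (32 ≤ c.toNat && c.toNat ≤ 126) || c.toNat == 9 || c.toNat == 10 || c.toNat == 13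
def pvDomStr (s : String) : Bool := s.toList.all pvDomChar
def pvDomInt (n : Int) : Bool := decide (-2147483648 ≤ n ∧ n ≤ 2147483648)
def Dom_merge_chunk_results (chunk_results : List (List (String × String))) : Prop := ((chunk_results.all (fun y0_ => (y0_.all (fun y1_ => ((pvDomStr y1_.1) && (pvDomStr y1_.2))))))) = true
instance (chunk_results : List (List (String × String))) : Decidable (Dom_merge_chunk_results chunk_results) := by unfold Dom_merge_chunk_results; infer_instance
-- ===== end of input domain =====

-- B walks the chunks back-to-front, prepending each kept part directly onto an incrementally
-- joined per-section string (none = nothing yet), instead of A's three collected lists joined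
-- at the end (objective: alternative decomposition, same cost).

-- ===== PORT A =====
-- per-chunk step of A's for-loop: appends to the three accumulator lists.
-- `result.get(k)` is only used under a truthiness guard, so a missing key (Python None)
-- and "" behave identically; the port reads the value with default "" — exact here.
def mcrStep (acc : List String × List String × List String) (result : List (String × String)) :
    List String × List String × List String :=
  let d : PySem.Dict String String := PySem.Dict.mk result
  let vi := d.getD "introduction" ""
  let acc := if !(vi == "") && !(PySem.Str.startswith vi "[PARTIAL]") then
      (acc.1 ++ [vi], acc.2.1, acc.2.2) else acc
  let vm := d.getD "main_content" ""
  let acc := if !(vm == "") then (acc.1, acc.2.1 ++ [vm], acc.2.2) else acc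
  let vc := d.getD "conclusion" ""
  if !(vc == "") && !(PySem.Str.startswith vc "[PARTIAL]") then
    (acc.1, acc.2.1, acc.2.2 ++ [vc]) else acc

def merge_chunk_results (chunk_results : List (List (String × String))) : List (String × String) :=
  let merged : PySem.Dict String String :=
    PySem.Dict.mk [("introduction", ""), ("main_content", ""), ("conclusion", "")]
  let collected := chunk_results.foldl mcrStep ([], [], [])
  let all_intros := collected.1
  let all_main := collected.2.1
  let all_conclusions := collected.2.2
  let merged := merged.insert "introduction"
    (if all_intros ≠ [] then PySem.Str.join "\n\n" all_intros
     else "Document introduction not clearly identified.")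
  let merged := merged.insert "main_content"
    (if all_main ≠ [] then PySem.Str.join "\n\n" all_main
     else "Main content processing incomplete.")
  let merged := merged.insert "conclusion"
    (if all_conclusions ≠ [] then PySem.Str.join "\n\n" all_conclusions
     else "Document conclusion not clearly identified.")
  merged.items

-- ===== PORT B =====
-- `prepend(v, tail, allow_partial)`: Python's `not v` is true for None and "";
-- `v.startswith` is only reached when v is a truthy str, read via getD "" — exact here.
def mcrPrepend (v : Option String) (tail : Option String) (allowPartial : Bool) : Option String :=
  let truthy := match v with | none => false | some s => !(s == "")
  if !truthy || (!allowPartial && PySem.Str.startswith (v.getD "") "[PARTIAL]") then tail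
  else some (match tail with | none => v.getD "" | some t => v.getD "" ++ "\n\n" ++ t)

-- `for r in reversed(chunk_results)` over the triple (intro, main, concl)
def merge_chunk_results_alt (chunk_results : List (List (String × String))) : List (String × String) :=
  let st := chunk_results.reverse.foldl
    (fun (st : Option String × Option String × Option String) r =>
      let d : PySem.Dict String String := PySem.Dict.mk r
      (mcrPrepend (d.get? "introduction") st.1 false,
       mcrPrepend (d.get? "main_content") st.2.1 true,
       mcrPrepend (d.get? "conclusion") st.2.2 false))
    (none, none, none)
  [("introduction", match st.1 with | none => "Document introduction not clearly identified." | some s => s),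
   ("main_content", match st.2.1 with | none => "Main content processing incomplete." | some s => s),
   ("conclusion", match st.2.2 with | none => "Document conclusion not clearly identified." | some s => s)]

-- ===== PRECONDITION & SPEC =====
def Spec_merge_chunk_results (chunk_results : List (List (String × String))) (out : List (String × String)) : Prop := out = merge_chunk_results_alt chunk_results
instance (chunk_results : List (List (String × String))) (out : List (String × String)) : Decidable (Spec_merge_chunk_results chunk_results out) := by unfold Spec_merge_chunk_results; infer_instance

-- ===== CLAIM (what is proved, stated in full; the proofs are below) =====
def Claim_equal_merge_chunk_results : Prop := ∀ (chunk_results : List (List (String × String))), Dom_merge_chunk_results chunk_results → Spec_merge_chunk_results chunk_results (merge_chunk_results chunk_results)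

-- ===== LEMMAS AND PROOFS =====

-- A-side predicates and per-key collected list
def mcrFull (v : String) : Bool := !(v == "") && !(PySem.Str.startswith v "[PARTIAL]")
def mcrTruthy (v : String) : Bool := !(v == "")
def mcrCollect (chunk_results : List (List (String × String))) (key : String) (pred : String → Bool) : List String :=
  (chunk_results.map (fun r => (PySem.Dict.mk r).getD key "")).filter pred

-- A's step appends exactly the per-chunk kept values
theorem mcrStep_eq (acc : List String × List String × List String) (r : List (String × String)) :
    mcrStep acc r =
      (acc.1 ++ (if mcrFull ((PySem.Dict.mk r).getD "introduction" "") then [(PySem.Dict.mk r).getD "introduction" ""] else []),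
       acc.2.1 ++ (if mcrTruthy ((PySem.Dict.mk r).getD "main_content" "") then [(PySem.Dict.mk r).getD "main_content" ""] else []),
       acc.2.2 ++ (if mcrFull ((PySem.Dict.mk r).getD "conclusion" "") then [(PySem.Dict.mk r).getD "conclusion" ""] else [])) := by
  unfold mcrStep mcrFull mcrTruthy
  dsimp only
  generalize (PySem.Dict.mk r).getD "introduction" "" = vi
  generalize (PySem.Dict.mk r).getD "main_content" "" = vm
  generalize (PySem.Dict.mk r).getD "conclusion" "" = vc
  cases h1 : (!(vi == "") && !(PySem.Str.startswith vi "[PARTIAL]")) <;>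
  cases h2 : (!(vm == "")) <;>
  cases h3 : (!(vc == "") && !(PySem.Str.startswith vc "[PARTIAL]")) <;>
  simp

theorem mcrFold_eq (chunk_results : List (List (String × String)))
    (acc : List String × List String × List String) :
    chunk_results.foldl mcrStep acc =
      (acc.1 ++ mcrCollect chunk_results "introduction" mcrFull,
       acc.2.1 ++ mcrCollect chunk_results "main_content" mcrTruthy,
       acc.2.2 ++ mcrCollect chunk_results "conclusion" mcrFull) := by
  induction chunk_results generalizing acc with
  | nil => simp [mcrCollect]
  | cons r rest ih =>
    simp only [List.foldl_cons, ih, mcrStep_eq, mcrCollect, List.map_cons, List.filter_cons]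
    refine Prod.ext ?_ (Prod.ext ?_ ?_) <;> simp <;> split_ifs <;> simp_all

-- B-side characterisation: the incremental string is the join of the collected list
def mcrOptJoin : List String → Option String
  | [] => none
  | l => some (PySem.Str.join "\n\n" l)

theorem mcrJoin_cons (a b : String) (l : List String) :
    PySem.Str.join "\n\n" (a :: b :: l) = a ++ "\n\n" ++ PySem.Str.join "\n\n" (b :: l) := by
  apply String.toList_injective
  simp [PySem.Str.toList_join, PySem.Chars.join_cons_cons]

theorem mcrJoin_singleton (a : String) : PySem.Str.join "\n\n" [a] = a := by
  apply String.toList_injective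
  simp [PySem.Str.toList_join]

-- uniform predicate: allowPartial = false gives mcrFull, true gives mcrTruthy
def mcrPred (allowPartial : Bool) (s : String) : Bool :=
  !(s == "") && (allowPartial || !(PySem.Str.startswith s "[PARTIAL]"))

theorem mcrPrepend_optJoin (v : Option String) (l : List String) (ok : Bool) :
    mcrPrepend v (mcrOptJoin l) ok =
      mcrOptJoin ((if mcrPred ok (v.getD "") then [v.getD ""] else []) ++ l) := by
  cases v with
  | none =>
    simp [mcrPrepend, mcrPred]
  | some s =>
    unfold mcrPrepend mcrPred
    by_cases hs : s = ""
    · subst hs; simp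
    · cases ok with
      | false =>
        dsimp only [Option.getD_some]
        simp only [PySem.Str.startswith_eq]
        by_cases hp : PySem.Chars.startswith s.toList ['[', 'P', 'A', 'R', 'T', 'I', 'A', 'L', ']'] = true <;>
          cases l <;> simp [hs, hp, mcrOptJoin, mcrJoin_cons, mcrJoin_singleton]
      | true =>
        cases l <;> simp [hs, mcrOptJoin, mcrJoin_cons, mcrJoin_singleton]

-- the reversed-loop fold computes the optJoin of each collected list
theorem mcrAltFold_eq (chunk_results : List (List (String × String))) :
    chunk_results.reverse.foldl
      (fun (st : Option String × Option String × Option String) r =>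
        let d : PySem.Dict String String := PySem.Dict.mk r
        (mcrPrepend (d.get? "introduction") st.1 false,
         mcrPrepend (d.get? "main_content") st.2.1 true,
         mcrPrepend (d.get? "conclusion") st.2.2 false))
      (none, none, none) =
      (mcrOptJoin (mcrCollect chunk_results "introduction" mcrFull),
       mcrOptJoin (mcrCollect chunk_results "main_content" mcrTruthy),
       mcrOptJoin (mcrCollect chunk_results "conclusion" mcrFull)) := by
  rw [List.foldl_reverse]
  induction chunk_results with
  | nil => simp [mcrCollect, mcrOptJoin]
  | cons r rest ih =>
    have hfull : ∀ s, mcrPred false s = mcrFull s := by intro s; simp [mcrPred, mcrFull]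
    have htr : ∀ s, mcrPred true s = mcrTruthy s := by intro s; simp [mcrPred, mcrTruthy]
    have hget : ∀ k, ((PySem.Dict.mk r).get? k).getD "" = (PySem.Dict.mk r).getD k "" := by
      intro k; rw [PySem.Dict.getD_eq_get?_getD]
    simp only [List.foldr_cons, ih, mcrPrepend_optJoin, hget, hfull, htr]
    simp only [mcrCollect, List.map_cons, List.filter_cons]
    refine Prod.ext ?_ (Prod.ext ?_ ?_) <;> dsimp <;> split_ifs <;> simp_all

-- ===== VERDICT (by name: the statement is the Claim_ definition above) =====
theorem merge_chunk_results_spec : Claim_equal_merge_chunk_results := by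
  intro chunk_results _
  unfold Spec_merge_chunk_results merge_chunk_results merge_chunk_results_alt
  simp only [mcrFold_eq, mcrAltFold_eq, List.nil_append]
  simp only [PySem.Dict.insert]
  cases hi : mcrCollect chunk_results "introduction" mcrFull <;>
  cases hm : mcrCollect chunk_results "main_content" mcrTruthy <;>
  cases hc : mcrCollect chunk_results "conclusion" mcrFull <;>
    simp [mcrOptJoin]
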